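-- pv_equiv track=rewrite | github.com/Joaco-gavernet/competitive-programming | rounds/round-173/second/C.py | checks
-- ===== SOURCE A (Python) =====
-- def checks(pref, inicio, fin):
--     inicio += 1; fin += 1
--     l = inicio -1; r = inicio; ax = 0
--     while r < fin:
--         ax = max(ax, pref[r] -pref[l])
--         if pref[r] -pref[l] <= 0:
--             l = r
--         r += 1
--
--     l = inicio -1; r = inicio; an = 0
--     while r < fin:
--         an = min(an, pref[r] -pref[l])
--         if pref[r] -pref[l] >= 0:
--             l = r
--         r += 1
--     return an, ax
-- ===== SOURCE B (Python) =====
-- def checks(pref, inicio, fin):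
--     # Fused single-pass Kadane over consecutive differences (return-value equivalent to A).
--     ax = an = 0
--     cur_max = cur_min = 0
--     for r in range(inicio + 1, fin + 1):
--         a = pref[r] - pref[r - 1]
--         cur_max = max(0, cur_max + a)
--         ax = max(ax, cur_max)
--         cur_min = min(0, cur_min + a)
--         an = min(an, cur_min)
--     return an, ax
-- ===== Notes on version B (the rewrite author's own statement) =====
-- stated objective: idiomatic
-- what changed: Replaced A's two left-pointer-reset passes (tracking the last reset index l and recomputing pref[r]-pref[l]) by one fused classic Kadane pass over consecutive differences with clamped running max/min accumulators.
import Mathlib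
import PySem

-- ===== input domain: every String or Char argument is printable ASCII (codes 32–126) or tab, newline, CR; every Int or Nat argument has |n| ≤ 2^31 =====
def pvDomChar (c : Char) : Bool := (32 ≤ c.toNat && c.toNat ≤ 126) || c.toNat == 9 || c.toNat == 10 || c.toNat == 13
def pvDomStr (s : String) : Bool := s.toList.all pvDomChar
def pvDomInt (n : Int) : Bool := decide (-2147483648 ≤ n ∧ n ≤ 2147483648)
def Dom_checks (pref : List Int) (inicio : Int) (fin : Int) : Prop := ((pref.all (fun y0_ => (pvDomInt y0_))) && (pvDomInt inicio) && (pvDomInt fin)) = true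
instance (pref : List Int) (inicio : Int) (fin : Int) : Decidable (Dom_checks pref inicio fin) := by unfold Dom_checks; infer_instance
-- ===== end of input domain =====

-- B replaces A's two left-pointer-reset passes by one fused Kadane pass over consecutive
-- differences (idiomatic restructuring; same return value).

-- pref[i] with Python index semantics; the default 0 is only reachable outside Pre_checks
-- (Python raises IndexError there).
def pvIx (p : List Int) (i : Int) : Int := (PySem.List.pyGet? p i).getD 0

-- ===== PORT A =====
-- step of A's first while-loop, state (l, ax)
def stepMax (p : List Int) (st : Int × Int) (r : Int) : Int × Int :=
  (if pvIx p r - pvIx p st.1 ≤ 0 then r else st.1, max st.2 (pvIx p r - pvIx p st.1))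

-- step of A's second while-loop, state (l, an)
def stepMin (p : List Int) (st : Int × Int) (r : Int) : Int × Int :=
  (if pvIx p r - pvIx p st.1 ≥ 0 then r else st.1, min st.2 (pvIx p r - pvIx p st.1))

def checks (pref : List Int) (inicio : Int) (fin : Int) : Int × Int :=
  let inicio := inicio + 1
  let fin := fin + 1
  let ax := ((PySem.List.pyRange inicio fin 1).foldl (stepMax pref) (inicio - 1, 0)).2
  let an := ((PySem.List.pyRange inicio fin 1).foldl (stepMin pref) (inicio - 1, 0)).2
  (an, ax)

-- ===== PORT B =====
-- step of B's fused loop, state (cur_max, ax, cur_min, an)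
def stepB (p : List Int) (st : Int × Int × Int × Int) (r : Int) : Int × Int × Int × Int :=
  let a := pvIx p r - pvIx p (r - 1)
  let cm := max 0 (st.1 + a)
  let cn := min 0 (st.2.2.1 + a)
  (cm, max st.2.1 cm, cn, min st.2.2.2 cn)

def checks_alt (pref : List Int) (inicio : Int) (fin : Int) : Int × Int :=
  let st := (PySem.List.pyRange (inicio + 1) (fin + 1) 1).foldl (stepB pref) (0, 0, 0, 0)
  (st.2.2.2, st.2.1)

-- ===== PRECONDITION & SPEC =====
-- Pre_ excludes exactly the inputs where Python A raises IndexError: a non-empty index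
-- range [inicio, fin] reaching outside [-len(pref), len(pref)).
def Pre_checks (pref : List Int) (inicio : Int) (fin : Int) : Prop :=
  inicio < fin → (-(pref.length : Int) ≤ inicio ∧ fin < (pref.length : Int))
instance (pref : List Int) (inicio : Int) (fin : Int) : Decidable (Pre_checks pref inicio fin) := by unfold Pre_checks; infer_instance
def pvWitness_checks : List Int × Int × Int := ([3, 1, 4, 1, 5], 0, 4)

def Spec_checks (pref : List Int) (inicio : Int) (fin : Int) (out : Int × Int) : Prop := out = checks_alt pref inicio fin
instance (pref : List Int) (inicio : Int) (fin : Int) (out : Int × Int) : Decidable (Spec_checks pref inicio fin out) := by unfold Spec_checks; infer_instance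

-- ===== CLAIM (what is proved, stated in full; the proofs are below) =====
def Claim_equal_checks : Prop := ∀ (pref : List Int) (inicio : Int) (fin : Int), Dom_checks pref inicio fin → Pre_checks pref inicio fin → Spec_checks pref inicio fin (checks pref inicio fin)

-- ===== LEMMAS AND PROOFS =====

-- Loop invariant linking A's two (l, acc) states to B's fused clamped-accumulator state,
-- pushed through the shared index range by induction on its length.
theorem pass_equiv (p : List Int) (t : Int) :
    ∀ (n : Nat) (s lx ln ax an : Int), (t - s).toNat = n →
    0 ≤ ax → an ≤ 0 →
    pvIx p (s - 1) - pvIx p lx = max 0 (pvIx p (s - 1) - pvIx p lx) →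
    pvIx p (s - 1) - pvIx p ln = min 0 (pvIx p (s - 1) - pvIx p ln) →
    (((PySem.List.pyRange s t 1).foldl (stepB p)
        (pvIx p (s - 1) - pvIx p lx, ax, pvIx p (s - 1) - pvIx p ln, an)).2.1 =
      ((PySem.List.pyRange s t 1).foldl (stepMax p) (lx, ax)).2) ∧
    (((PySem.List.pyRange s t 1).foldl (stepB p)
        (pvIx p (s - 1) - pvIx p lx, ax, pvIx p (s - 1) - pvIx p ln, an)).2.2.2 =
      ((PySem.List.pyRange s t 1).foldl (stepMin p) (ln, an)).2) := by
  intro n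
  induction n with
  | zero =>
    intro s lx ln ax an hn _ _ _ _
    have hts : t ≤ s := by omega
    rw [PySem.List.pyRange_one_eq_nil hts]
    exact ⟨rfl, rfl⟩
  | succ k ih =>
    intro s lx ln ax an hn hax han hcx hcn
    have hst : s < t := by omega
    rw [PySem.List.pyRange_one_cons hst]
    simp only [List.foldl_cons]
    have hstepB : stepB p (pvIx p (s - 1) - pvIx p lx, ax, pvIx p (s - 1) - pvIx p ln, an) s =
        (max 0 (pvIx p s - pvIx p lx), max ax (max 0 (pvIx p s - pvIx p lx)),
         min 0 (pvIx p s - pvIx p ln), min an (min 0 (pvIx p s - pvIx p ln))) := by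
      simp only [stepB]
      have e : ∀ a b c : Int, a - b + (c - a) = c - b := fun a b c => by ring
      simp only [e]
    rw [hstepB]
    have hsx : pvIx p ((s + 1) - 1) - pvIx p ((stepMax p (lx, ax) s).1) =
        max 0 (pvIx p s - pvIx p lx) := by
      simp only [stepMax]
      split_ifs with h
      · simp only [show s + 1 - 1 = s by ring]; omega
      · simp only [show s + 1 - 1 = s by ring]; omega
    have hsn : pvIx p ((s + 1) - 1) - pvIx p ((stepMin p (ln, an) s).1) =
        min 0 (pvIx p s - pvIx p ln) := by
      simp only [stepMin]
      split_ifs with h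
      · simp only [show s + 1 - 1 = s by ring]; omega
      · simp only [show s + 1 - 1 = s by ring]; omega
    have h2x : (stepMax p (lx, ax) s).2 = max ax (max 0 (pvIx p s - pvIx p lx)) := by
      simp only [stepMax]; omega
    have h2n : (stepMin p (ln, an) s).2 = min an (min 0 (pvIx p s - pvIx p ln)) := by
      simp only [stepMin]; omega
    have := ih (s + 1) (stepMax p (lx, ax) s).1 (stepMin p (ln, an) s).1
        (max ax (max 0 (pvIx p s - pvIx p lx))) (min an (min 0 (pvIx p s - pvIx p ln)))
        (by omega) (by omega) (by omega)
        (by rw [hsx]; omega) (by rw [hsn]; omega)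
    rw [hsx, hsn] at this
    refine ⟨?_, ?_⟩
    · rw [this.1]
      have : stepMax p (lx, ax) s = ((stepMax p (lx, ax) s).1, max ax (max 0 (pvIx p s - pvIx p lx))) := by
        rw [← h2x]
      rw [← this]
    · rw [this.2]
      have : stepMin p (ln, an) s = ((stepMin p (ln, an) s).1, min an (min 0 (pvIx p s - pvIx p ln))) := by
        rw [← h2n]
      rw [← this]

-- ===== VERDICT (by name: the statement is the Claim_ definition above) =====
theorem checks_spec : Claim_equal_checks := by
  intro pref inicio fin _ _
  unfold Spec_checks checks checks_alt
  have h := pass_equiv pref (fin + 1) ((fin + 1) - (inicio + 1)).toNat (inicio + 1)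
      ((inicio + 1) - 1) ((inicio + 1) - 1) 0 0 rfl le_rfl le_rfl (by omega) (by omega)
  simp only [show (inicio + 1) - 1 = inicio from by ring, sub_self] at h
  simp only [add_sub_cancel_right]
  rw [← h.1, ← h.2]
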